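-- pv_equiv track=rewrite | github.com/dmiyakawa/atcoder-playground | atcoder/abc241/c.py | check
-- ===== SOURCE A (Python) =====
-- def check(n, table):
--     for row_index in range(n):
--         for col_index in range(n):
--             do_search_right = col_index + 5 < n
--             do_search_left = col_index >= 5
--             do_search_down = row_index + 5 < n
--             if do_search_right and sum(table[row_index][col_index:col_index + 6]) >= 4:
--                 return True
--             if do_search_down:
--                 count_v = 0
--                 count_d1 = 0
--                 count_d2 = 0
--                 for i in range(6):
--                     count_v += table[row_index + i][col_index]
--                     if do_search_right:
--                         count_d1 += table[row_index + i][col_index + i]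
--                     if do_search_left:
--                         count_d2 += table[row_index + i][col_index - i]
--                 if count_v >= 4 or count_d1 >= 4 or count_d2 >= 4:
--                     return True
--     return False
-- ===== SOURCE B (Python) =====
-- def has_window(line):
--     pre = [0]
--     for v in line:
--         pre.append(pre[-1] + v)
--     return any(pre[i + 6] - pre[i] >= 4 for i in range(len(line) - 5))
--
--
-- def check(n, table):
--     if n < 6:
--         return False
--     rows = [table[r][:n] for r in range(n)]
--     cols = [list(col) for col in zip(*rows)]
--     diags = [[rows[r][r - d] for r in range(max(0, d), min(n, n + d))]
--              for d in range(-(n - 6), n - 5)]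
--     antis = [[rows[r][k - r] for r in range(max(0, k - n + 1), min(n, k + 1))]
--              for k in range(5, 2 * n - 6)]
--     return any(has_window(line) for line in rows + cols + diags + antis)
-- ===== Notes on version B (the rewrite author's own statement) =====
-- stated objective: alternative
-- what changed: Instead of A's per-cell scan re-summing four directional 6-windows with flag-guarded inner loops, B extracts every line of the grid (rows, zip-transposed columns, both diagonal families), builds a prefix-sum array once per line, and tests each 6-window as a difference of two prefix sums.
-- outside the precondition, e.g. on check(9, [[0, 10], [], [-2, 4], [6, 6, 5], [156]]): A returns True, B raises IndexError
import Mathlib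
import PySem

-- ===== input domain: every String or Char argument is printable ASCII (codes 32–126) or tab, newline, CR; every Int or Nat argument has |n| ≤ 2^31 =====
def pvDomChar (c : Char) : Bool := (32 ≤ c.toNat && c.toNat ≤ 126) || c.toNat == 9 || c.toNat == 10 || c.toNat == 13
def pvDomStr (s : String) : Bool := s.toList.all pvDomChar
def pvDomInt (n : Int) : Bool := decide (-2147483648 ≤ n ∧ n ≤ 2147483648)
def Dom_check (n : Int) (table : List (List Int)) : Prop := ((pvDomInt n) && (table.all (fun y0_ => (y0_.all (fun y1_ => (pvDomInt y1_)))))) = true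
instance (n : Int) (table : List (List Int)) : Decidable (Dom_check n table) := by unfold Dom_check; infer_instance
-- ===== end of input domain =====

-- B replaces A's per-cell scan (which re-sums four directional 6-windows under flag guards)
-- by extracting every line of the grid (rows, transposed columns, two diagonal families),
-- building a prefix-sum array once per line, and testing each 6-window as a difference of
-- two prefix sums (objective: alternative; same asymptotic cost).

-- ===== PORT A =====
-- body of A's double loop at cell (r, c); early 'return True' becomes the Bool result of 'any'
def checkInner (n : Int) (table : List (List Int)) (r c : Int) : Bool :=
  let doRight := decide (c + 5 < n)
  let doLeft := decide (5 ≤ c)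
  let doDown := decide (r + 5 < n)
  if doRight && decide (4 ≤ (PySem.List.slice (PySem.List.pyGetD table r []) (some c) (some (c + 6))).sum) then
    true
  else if doDown then
    let s := (PySem.List.pyRange 0 6 1).foldl
      (fun (acc : Int × Int × Int) i =>
        (acc.1 + PySem.List.pyGetD (PySem.List.pyGetD table (r + i) []) c 0,
         (if doRight then acc.2.1 + PySem.List.pyGetD (PySem.List.pyGetD table (r + i) []) (c + i) 0 else acc.2.1),
         (if doLeft then acc.2.2 + PySem.List.pyGetD (PySem.List.pyGetD table (r + i) []) (c - i) 0 else acc.2.2)))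
      ((0 : Int), (0 : Int), (0 : Int))
    decide (4 ≤ s.1) || decide (4 ≤ s.2.1) || decide (4 ≤ s.2.2)
  else false

-- 'for … in range(n)': the loop bound is capped by the rows/row length actually present —
-- a totality/feasibility guard only (it never fires inside Pre_, where the table has n×n
-- entries whenever n ≥ 6, and for n ≤ 5 no window fits so every iteration yields false)
def check (n : Int) (table : List (List Int)) : Bool :=
  (PySem.List.pyRange 0 (min n (table.length : Int)) 1).any fun r =>
    (PySem.List.pyRange 0 (min n ((PySem.List.pyGetD table r []).length : Int)) 1).any fun c =>
      checkInner n table r c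

-- ===== PORT B =====
-- has_window(line): prefix sums pre (pre[-1] is the running last element), then any
-- 6-window tested as pre[i+6] - pre[i] >= 4
def has_window (line : List Int) : Bool :=
  let pre := line.foldl (fun pre v => pre ++ [PySem.List.pyGetD pre (-1) 0 + v]) [(0 : Int)]
  (PySem.List.pyRange 0 ((line.length : Int) - 5) 1).any fun i =>
    decide (4 ≤ PySem.List.pyGetD pre (i + 6) 0 - PySem.List.pyGetD pre i 0)

-- zip(*rows): truncates to the shortest row (exact; c < every row length, so getD never defaults)
def pyZipStar (rows : List (List Int)) : List (List Int) :=
  let m := ((rows.map List.length).min?).getD 0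
  (List.range m).map fun c => rows.map fun row => row.getD c 0

def check_alt (n : Int) (table : List (List Int)) : Bool :=
  if n < 6 then false
  else
    let rows := (PySem.List.pyRange 0 n 1).map fun r =>
      PySem.List.slice (PySem.List.pyGetD table r []) none (some n)
    let cols := pyZipStar rows
    let diags := (PySem.List.pyRange (-(n - 6)) (n - 5) 1).map fun d =>
      (PySem.List.pyRange (max 0 d) (min n (n + d)) 1).map fun r =>
        PySem.List.pyGetD (PySem.List.pyGetD rows r []) (r - d) 0
    let antis := (PySem.List.pyRange 5 (2 * n - 6) 1).map fun k =>
      (PySem.List.pyRange (max 0 (k - n + 1)) (min n (k + 1)) 1).map fun r =>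
        PySem.List.pyGetD (PySem.List.pyGetD rows r []) (k - r) 0
    (rows ++ cols ++ diags ++ antis).any has_window

-- ===== PRECONDITION & SPEC =====
-- For n ≥ 6 (the only case where any window fits, hence any indexing happens), Pre_ excludes
-- tables that do not contain an n×n grid (fewer than n rows, or a scanned row shorter than n):
-- on those A raises IndexError (or happens to return True only via an early horizontal hit
-- before first touching a missing entry).
def Pre_check (n : Int) (table : List (List Int)) : Prop :=
  6 ≤ n → (n ≤ (table.length : Int) ∧ ∀ row ∈ table.take n.toNat, n ≤ (row.length : Int))
instance (n : Int) (table : List (List Int)) : Decidable (Pre_check n table) := by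
  unfold Pre_check; infer_instance
def pvWitness_check : Int × List (List Int) := (1, [[0]])
def Spec_check (n : Int) (table : List (List Int)) (out : Bool) : Prop := out = check_alt n table
instance (n : Int) (table : List (List Int)) (out : Bool) : Decidable (Spec_check n table out) := by unfold Spec_check; infer_instance

-- ===== CLAIM (what is proved, stated in full; the proofs are below) =====
def Claim_equal_check : Prop := ∀ (n : Int) (table : List (List Int)), Dom_check n table → Pre_check n table → Spec_check n table (check n table)

-- ===== LEMMAS AND PROOFS =====

-- the value of cell (r, c) as both programs read it
def cellA (t : List (List Int)) (r c : Int) : Int :=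
  PySem.List.pyGetD (PySem.List.pyGetD t r []) c 0

-- the 6-cell sum from start (r, c) in direction (dr, dc)
def dsum (t : List (List Int)) (r c dr dc : Int) : Int :=
  ((List.range 6).map fun k => cellA t (r + k * dr) (c + k * dc)).sum

-- 'some 6-window in direction (dr, dc) fits in the n×n grid and sums to ≥ 4'
def Win (n : Int) (t : List (List Int)) (dr dc : Int) : Prop :=
  ∃ r c : Int, 0 ≤ r ∧ r < n ∧ 0 ≤ c ∧ c < n ∧
    0 ≤ r + 5 * dr ∧ r + 5 * dr < n ∧ 0 ≤ c + 5 * dc ∧ c + 5 * dc < n ∧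
    4 ≤ dsum t r c dr dc

theorem sum6_congr (f g : ℕ → Int) (h : ∀ k, k < 6 → f k = g k) :
    ((List.range 6).map f).sum = ((List.range 6).map g).sum := by
  apply congrArg
  apply List.map_congr_left
  intro k hk
  exact h k (List.mem_range.mp hk)

theorem dsum_expand (t : List (List Int)) (r c dr dc : Int) :
    dsum t r c dr dc = cellA t r c + cellA t (r + dr) (c + dc) + cellA t (r + 2*dr) (c + 2*dc)
      + cellA t (r + 3*dr) (c + 3*dc) + cellA t (r + 4*dr) (c + 4*dc) + cellA t (r + 5*dr) (c + 5*dc) := by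
  rw [dsum, show List.range 6 = [0,1,2,3,4,5] from by decide]
  simp only [List.pure_def, List.bind_eq_flatMap, List.flatMap_cons, List.flatMap_nil,
    List.append_nil, List.map_cons, List.map_nil, List.sum_cons, List.sum_nil, List.cons_append,
    List.nil_append]
  push_cast
  norm_num
  ring_nf

-- ===== A-side: check = true ↔ some direction wins =====

theorem sum_len_six (l : List Int) (h : l.length = 6) :
    l.sum = l.getD 0 0 + l.getD 1 0 + l.getD 2 0 + l.getD 3 0 + l.getD 4 0 + l.getD 5 0 := by
  match l, h with
  | [a, b, c, d, e, f], _ => simp [List.sum]; ring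

theorem slice_six_sum (xs : List Int) (c : Int) (h0 : 0 ≤ c) (h : c + 6 ≤ (xs.length : Int)) :
    (PySem.List.slice xs (some c) (some (c + 6))).sum =
      PySem.List.pyGetD xs c 0 + PySem.List.pyGetD xs (c + 1) 0 + PySem.List.pyGetD xs (c + 2) 0 +
      PySem.List.pyGetD xs (c + 3) 0 + PySem.List.pyGetD xs (c + 4) 0 + PySem.List.pyGetD xs (c + 5) 0 := by
  obtain ⟨m, rfl⟩ : ∃ m : ℕ, c = (m : Int) := ⟨c.toNat, (Int.toNat_of_nonneg h0).symm⟩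
  have h6 : m + 6 ≤ xs.length := by exact_mod_cast h
  have hs : PySem.List.slice xs (some (m : Int)) (some ((m : Int) + 6)) = (xs.drop m).take 6 := by
    have := PySem.List.slice_natCast_add xs m 6
    simpa using this
  have hg : ∀ j : ℕ, j < 6 → ((xs.drop m).take 6).getD j 0 = xs.getD (m + j) 0 := by
    intro j hj
    rw [List.getD_eq_getElem?_getD, List.getElem?_take_of_lt hj, List.getElem?_drop,
      List.getD_eq_getElem?_getD]
  have hlen : ((xs.drop m).take 6).length = 6 := by
    simp [List.length_take, List.length_drop]; omega
  rw [hs, sum_len_six _ hlen, hg 0 (by omega), hg 1 (by omega), hg 2 (by omega),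
    hg 3 (by omega), hg 4 (by omega), hg 5 (by omega)]
  have e1 : ((m : Int) + 1) = ((m + 1 : ℕ) : Int) := by push_cast; ring
  have e2 : ((m : Int) + 2) = ((m + 2 : ℕ) : Int) := by push_cast; ring
  have e3 : ((m : Int) + 3) = ((m + 3 : ℕ) : Int) := by push_cast; ring
  have e4 : ((m : Int) + 4) = ((m + 4 : ℕ) : Int) := by push_cast; ring
  have e5 : ((m : Int) + 5) = ((m + 5 : ℕ) : Int) := by push_cast; ring
  simp only [e1, e2, e3, e4, e5, PySem.List.pyGetD_natCast, List.getD_eq_getElem?_getD, Nat.add_zero]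

theorem pyRangeSix : PySem.List.pyRange 0 6 1 = [0, 1, 2, 3, 4, 5] := by decide

theorem checkInner_iff (n : Int) (t : List (List Int)) (r c : Int)
    (hrowlen : c + 5 < n → n ≤ ((PySem.List.pyGetD t r []).length : Int))
    (hc0 : 0 ≤ c) :
    checkInner n t r c = true ↔
      ((c + 5 < n ∧ 4 ≤ dsum t r c 0 1) ∨ (r + 5 < n ∧ 4 ≤ dsum t r c 1 0) ∨
       (r + 5 < n ∧ c + 5 < n ∧ 4 ≤ dsum t r c 1 1) ∨ (r + 5 < n ∧ 5 ≤ c ∧ 4 ≤ dsum t r c 1 (-1))) := by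
  unfold checkInner
  rw [pyRangeSix]
  simp only [dsum_expand, cellA]
  by_cases hR : c + 5 < n <;> by_cases hD : r + 5 < n <;> by_cases hL : 5 ≤ c <;>
    simp only [hR, hD, hL, decide_true, decide_false, Bool.true_and, Bool.false_and,
      if_true, List.foldl] <;>
    norm_num [hR, hD, hL]
  all_goals try rw [slice_six_sum (PySem.List.pyGetD t r []) c hc0 (by have := hrowlen hR; omega)]
  all_goals ring_nf
  all_goals try tauto

theorem checkInner_small (n : Int) (t : List (List Int)) (r c : Int)
    (hn : n < 6) (hr0 : 0 ≤ r) (hc0 : 0 ≤ c) : checkInner n t r c = false := by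
  unfold checkInner
  simp [show ¬(c + 5 < n) by omega, show ¬(r + 5 < n) by omega]

theorem Win_small (n : Int) (t : List (List Int)) (dr dc : Int)
    (hn : n < 6) (hd : (dr, dc) = ((0 : Int), (1 : Int)) ∨ (dr, dc) = (1, 0) ∨ (dr, dc) = (1, 1) ∨ (dr, dc) = (1, -1)) :
    ¬ Win n t dr dc := by
  rintro ⟨r, c, h1, h2, h3, h4, h5, h6, h7, h8, _⟩
  rcases hd with h | h | h | h <;>
    (injection h with hdr hdc; subst hdr; subst hdc; omega)

theorem A_iff (n : Int) (t : List (List Int)) (hpre : Pre_check n t) :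
    check n t = true ↔ (Win n t 0 1 ∨ Win n t 1 0 ∨ Win n t 1 1 ∨ Win n t 1 (-1)) := by
  by_cases hn : n < 6
  · have hfalse : check n t = false := by
      unfold check
      rw [List.any_eq_false]
      intro r hr
      rw [PySem.List.mem_pyRange_one] at hr
      rw [Bool.not_eq_true, List.any_eq_false]
      intro c hc
      rw [PySem.List.mem_pyRange_one] at hc
      simp [checkInner_small n t r c hn hr.1 hc.1]
    rw [hfalse]
    simp only [Bool.false_eq_true, false_iff]
    push_neg
    exact ⟨Win_small n t 0 1 hn (by simp), Win_small n t 1 0 hn (by simp),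
      Win_small n t 1 1 hn (by simp), Win_small n t 1 (-1) hn (by simp)⟩
  · have h6 : (6 : Int) ≤ n := by omega
    obtain ⟨hlen, hrows⟩ := hpre h6
    have hrowlen : ∀ r : Int, 0 ≤ r → r < n → n ≤ ((PySem.List.pyGetD t r []).length : Int) := by
      intro r hr0 hrn
      rw [PySem.List.pyGetD_eq_getElem _ _ hr0 (by omega)]
      apply hrows
      have hlt : r.toNat < (t.take n.toNat).length := by simp [List.length_take]; omega
      have := List.getElem_take (xs := t) (j := n.toNat) (i := r.toNat) (h := hlt)
      rw [← this]
      exact List.getElem_mem _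
    have hmin1 : min n (t.length : Int) = n := min_eq_left hlen
    have hcheck : check n t =
        (PySem.List.pyRange 0 n 1).any fun r =>
          (PySem.List.pyRange 0 n 1).any fun c => checkInner n t r c := by
      unfold check
      rw [hmin1]
      apply PySem.List.any_congr_mem
      intro r hr
      rw [PySem.List.mem_pyRange_one] at hr
      rw [min_eq_left (hrowlen r hr.1 hr.2)]
    rw [hcheck, List.any_eq_true]
    constructor
    · rintro ⟨r, hr, hin⟩
      rw [PySem.List.mem_pyRange_one] at hr
      rw [List.any_eq_true] at hin
      obtain ⟨c, hc, hchk⟩ := hin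
      rw [PySem.List.mem_pyRange_one] at hc
      rw [checkInner_iff n t r c (fun _ => hrowlen r hr.1 hr.2) hc.1] at hchk
      rcases hchk with ⟨h1, h2⟩ | ⟨h1, h2⟩ | ⟨h1, h2, h3⟩ | ⟨h1, h2, h3⟩
      · exact Or.inl ⟨r, c, by omega, by omega, by omega, by omega, by omega, by omega, by omega, by omega, h2⟩
      · exact Or.inr (Or.inl ⟨r, c, by omega, by omega, by omega, by omega, by omega, by omega, by omega, by omega, h2⟩)
      · exact Or.inr (Or.inr (Or.inl ⟨r, c, by omega, by omega, by omega, by omega, by omega, by omega, by omega, by omega, h3⟩))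
      · exact Or.inr (Or.inr (Or.inr ⟨r, c, by omega, by omega, by omega, by omega, by omega, by omega, by omega, by omega, h3⟩))
    · intro hwin
      have : ∃ r c : Int, 0 ≤ r ∧ r < n ∧ 0 ≤ c ∧ c < n ∧
          ((c + 5 < n ∧ 4 ≤ dsum t r c 0 1) ∨ (r + 5 < n ∧ 4 ≤ dsum t r c 1 0) ∨
           (r + 5 < n ∧ c + 5 < n ∧ 4 ≤ dsum t r c 1 1) ∨ (r + 5 < n ∧ 5 ≤ c ∧ 4 ≤ dsum t r c 1 (-1))) := by
        rcases hwin with ⟨r, c, h1, h2, h3, h4, h5, h6', h7, h8, h9⟩ |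
          ⟨r, c, h1, h2, h3, h4, h5, h6', h7, h8, h9⟩ |
          ⟨r, c, h1, h2, h3, h4, h5, h6', h7, h8, h9⟩ |
          ⟨r, c, h1, h2, h3, h4, h5, h6', h7, h8, h9⟩
        · exact ⟨r, c, h1, h2, h3, h4, Or.inl ⟨by omega, h9⟩⟩
        · exact ⟨r, c, h1, h2, h3, h4, Or.inr (Or.inl ⟨by omega, h9⟩)⟩
        · exact ⟨r, c, h1, h2, h3, h4, Or.inr (Or.inr (Or.inl ⟨by omega, by omega, h9⟩))⟩
        · exact ⟨r, c, h1, h2, h3, h4, Or.inr (Or.inr (Or.inr ⟨by omega, by omega, h9⟩))⟩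
      obtain ⟨r, c, h1, h2, h3, h4, hd⟩ := this
      refine ⟨r, by rw [PySem.List.mem_pyRange_one]; omega, ?_⟩
      rw [List.any_eq_true]
      refine ⟨c, by rw [PySem.List.mem_pyRange_one]; omega, ?_⟩
      rw [checkInner_iff n t r c (fun _ => hrowlen r h1 h2) h3]
      exact hd

-- ===== B-side: check_alt = true ↔ some direction wins =====

theorem pyGetD_last (l : List Int) (h : l ≠ []) : PySem.List.pyGetD l (-1) 0 = l.getLastD 0 := by
  unfold PySem.List.pyGetD PySem.List.pyGet? PySem.List.pyIdx?
  have hl : 0 < l.length := List.length_pos_iff.mpr h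
  rw [if_neg (by omega), if_pos (by omega : -(l.length : Int) ≤ -1)]
  have : l.length - ((-(-1 : Int)).toNat) = l.length - 1 := by norm_num
  rw [this]
  simp [List.getLastD_eq_getLast?, List.getLast?_eq_getElem?,
    List.getElem?_eq_getElem (by omega : l.length - 1 < l.length)]

theorem pre_aux (line : List Int) : ∀ (acc : List Int), acc ≠ [] →
    line.foldl (fun pre v => pre ++ [PySem.List.pyGetD pre (-1) 0 + v]) acc =
      acc ++ (List.range line.length).map (fun i => acc.getLastD 0 + (line.take (i+1)).sum) := by
  induction line with
  | nil => intro acc h; simp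
  | cons v tl ih =>
    intro acc h
    simp only [List.foldl_cons, List.length_cons]
    rw [pyGetD_last acc h, ih (acc ++ [acc.getLastD 0 + v]) (by simp)]
    rw [List.range_succ_eq_map]
    simp only [List.map_cons, List.map_map, List.getLastD_concat]
    simp only [List.take_succ_cons, List.sum_cons, List.append_assoc, List.cons_append,
      List.nil_append, List.take_zero, List.sum_nil]
    congr 1
    congr 1
    · ring
    · apply List.map_congr_left; intro i _; simp [Function.comp]; ring

theorem pre_spec (line : List Int) :
    line.foldl (fun pre v => pre ++ [PySem.List.pyGetD pre (-1) 0 + v]) [(0 : Int)] =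
      (List.range (line.length + 1)).map (fun i => (line.take i).sum) := by
  rw [pre_aux line [(0 : Int)] (by simp), List.range_succ_eq_map]
  simp [List.map_map, Function.comp]

theorem hw_iff (line : List Int) : has_window line = true ↔
    ∃ s : ℕ, s + 6 ≤ line.length ∧ 4 ≤ ((line.drop s).take 6).sum := by
  unfold has_window
  rw [pre_spec, List.any_eq_true]
  constructor
  · rintro ⟨i, hi, hd⟩
    rw [PySem.List.mem_pyRange_one] at hi
    refine ⟨i.toNat, by omega, ?_⟩
    rw [decide_eq_true_iff] at hd
    have hi6 : i + 6 = ((i.toNat + 6 : ℕ) : Int) := by omega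
    have hii : i = ((i.toNat : ℕ) : Int) := by omega
    rw [hi6, hii, PySem.List.pyGetD_natCast, PySem.List.pyGetD_natCast] at hd
    simp only [Int.toNat_natCast] at hd
    rw [List.getD_eq_getElem?_getD, List.getD_eq_getElem?_getD] at hd
    rw [List.getElem?_map, List.getElem?_range (by omega), List.getElem?_map,
        List.getElem?_range (by omega)] at hd
    simp only [Option.map_some, Option.getD_some] at hd
    have ht : line.take (i.toNat + 6) = line.take i.toNat ++ (line.drop i.toNat).take 6 :=
      List.take_add
    rw [ht, List.sum_append] at hd
    omega
  · rintro ⟨s, hs, hsum⟩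
    refine ⟨(s : Int), ?_, ?_⟩
    · rw [PySem.List.mem_pyRange_one]; omega
    · rw [decide_eq_true_iff]
      have hi6 : (s : Int) + 6 = ((s + 6 : ℕ) : Int) := by omega
      rw [hi6, PySem.List.pyGetD_natCast, PySem.List.pyGetD_natCast]
      rw [List.getD_eq_getElem?_getD, List.getD_eq_getElem?_getD,
          List.getElem?_map, List.getElem?_range (by omega), List.getElem?_map,
          List.getElem?_range (by omega)]
      simp only [Option.map_some, Option.getD_some]
      have ht : line.take (s + 6) = line.take s ++ (line.drop s).take 6 := List.take_add
      rw [ht, List.sum_append]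
      omega

theorem window_of_map_range (g : ℕ → Int) (L s : ℕ) (h : s + 6 ≤ L) :
    (((List.range L).map g).drop s).take 6 = (List.range 6).map (fun k => g (s + k)) := by
  apply List.ext_getElem
  · simp; omega
  · intro k h1 h2
    simp only [List.getElem_take, List.getElem_drop, List.getElem_map, List.getElem_range]

theorem hw_map_range (g : ℕ → Int) (L : ℕ) : has_window ((List.range L).map g) = true ↔
    ∃ s : ℕ, s + 6 ≤ L ∧ 4 ≤ ((List.range 6).map (fun k => g (s + k))).sum := by
  rw [hw_iff]
  constructor
  · rintro ⟨s, hs, hsum⟩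
    simp only [List.length_map, List.length_range] at hs
    exact ⟨s, hs, by rwa [window_of_map_range g L s hs] at hsum⟩
  · rintro ⟨s, hs, hsum⟩
    exact ⟨s, by simp; omega, by rwa [window_of_map_range g L s hs]⟩

theorem take_eq_map_range (xs : List Int) (m : ℕ) (h : m ≤ xs.length) :
    xs.take m = (List.range m).map (fun i => xs.getD i 0) := by
  apply List.ext_getElem
  · simp; omega
  · intro i h1 h2
    simp only [List.getElem_take, List.getElem_map, List.getElem_range]
    rw [List.getD_eq_getElem?_getD, List.getElem?_eq_getElem (by simp at h1; omega)]
    rfl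

theorem min?_const (l : List ℕ) (a : ℕ) (h : l ≠ []) (hc : ∀ x ∈ l, x = a) :
    l.min? = some a := by
  induction l with
  | nil => exact absurd rfl h
  | cons x tl ih =>
    rcases tl with _ | ⟨y, tl'⟩
    · simp [List.min?, hc x (by simp)]
    · rw [List.min?_cons]
      rw [ih (by simp) (fun z hz => hc z (by simp [hz]))]
      simp [hc x (by simp)]

theorem rows_eq (t : List (List Int)) (m : ℕ) (hlen : m ≤ t.length)
    (hrow : ∀ row ∈ t.take m, m ≤ row.length) :
    (PySem.List.pyRange 0 (m : Int) 1).map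
        (fun r => PySem.List.slice (PySem.List.pyGetD t r []) none (some (m : Int)))
      = (List.range m).map (fun r : ℕ => (List.range m).map fun c : ℕ => cellA t (r : Int) (c : Int)) := by
  rw [PySem.List.pyRange_one]
  simp only [Int.sub_zero, Int.toNat_natCast, List.map_map]
  apply List.map_congr_left
  intro r hr
  rw [List.mem_range] at hr
  simp only [Function.comp, Int.zero_add]
  rw [PySem.List.slice_to _ (by positivity), Int.toNat_natCast]
  have hgr : PySem.List.pyGetD t (r : Int) [] = t.getD r [] := PySem.List.pyGetD_natCast ..
  have hmem : t.getD r [] ∈ t.take m := by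
    rw [List.getD_eq_getElem?_getD, List.getElem?_eq_getElem (by omega)]
    have : (t.take m)[r]'(by simp; omega) ∈ t.take m := List.getElem_mem _
    simpa [List.getElem_take] using this
  rw [hgr, take_eq_map_range _ m (hrow _ hmem)]
  apply List.map_congr_left
  intro c _
  rw [cellA, hgr, PySem.List.pyGetD_natCast]

theorem cell_of_M (t : List (List Int)) (m : ℕ) (r c : Int)
    (hr0 : 0 ≤ r) (hrm : r < (m : Int)) (hc0 : 0 ≤ c) (hcm : c < (m : Int)) :
    PySem.List.pyGetD
        (PySem.List.pyGetD ((List.range m).map (fun r : ℕ => (List.range m).map fun c : ℕ => cellA t (r : Int) (c : Int))) r [])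
        c 0 = cellA t r c := by
  obtain ⟨a, rfl⟩ : ∃ a : ℕ, r = (a : Int) := ⟨r.toNat, by omega⟩
  obtain ⟨b, rfl⟩ : ∃ b : ℕ, c = (b : Int) := ⟨c.toNat, by omega⟩
  rw [PySem.List.pyGetD_natCast, PySem.List.pyGetD_natCast]
  have h1 : ((List.range m).map (fun r : ℕ => (List.range m).map fun c : ℕ => cellA t (r : Int) (c : Int))).getD a []
      = (List.range m).map (fun c : ℕ => cellA t (a : Int) (c : Int)) := by
    rw [List.getD_eq_getElem?_getD, List.getElem?_map, List.getElem?_range (by omega)]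
    simp
  rw [h1, List.getD_eq_getElem?_getD, List.getElem?_map, List.getElem?_range (by omega)]
  simp

theorem dsum_eq_sum6 (t : List (List Int)) (r c dr dc : Int) (f : ℕ → Int)
    (hf : ∀ k : ℕ, k < 6 → f k = cellA t (r + k * dr) (c + k * dc)) :
    ((List.range 6).map f).sum = dsum t r c dr dc :=
  sum6_congr f _ hf

theorem pyRange_map (f : Int → Int) (a b : Int) :
    (PySem.List.pyRange a b 1).map f = (List.range (b - a).toNat).map (fun k : ℕ => f (a + (k : Int))) := by
  rw [PySem.List.pyRange_one, List.map_map]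
  rfl

-- abbreviation for the materialised grid is written out each time (no extra def needed)
theorem rowsM_any_iff (t : List (List Int)) (m : ℕ) (h6 : 6 ≤ m) :
    ((List.range m).map (fun r : ℕ => (List.range m).map fun c : ℕ => cellA t (r : Int) (c : Int))).any has_window = true
      ↔ Win (m : Int) t 0 1 := by
  rw [List.any_eq_true]
  constructor
  · rintro ⟨line, hline, hw⟩
    rw [List.mem_map] at hline
    obtain ⟨r, hr, rfl⟩ := hline
    rw [List.mem_range] at hr
    rw [hw_map_range] at hw
    obtain ⟨s, hs, hsum⟩ := hw
    refine ⟨(r : Int), (s : Int), by omega, by omega, by omega, by omega, by omega, by omega, by omega, by omega, ?_⟩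
    rw [← dsum_eq_sum6 t (r : Int) (s : Int) 0 1 (fun k => cellA t (r : Int) ((s + k : ℕ) : Int))
      (by intro k hk; congr 1 <;> push_cast <;> ring)]
    exact hsum
  · rintro ⟨r, c, h1, h2, h3, h4, h5, h6', h7, h8, h9⟩
    obtain ⟨a, rfl⟩ : ∃ a : ℕ, r = (a : Int) := ⟨r.toNat, by omega⟩
    obtain ⟨b, rfl⟩ : ∃ b : ℕ, c = (b : Int) := ⟨c.toNat, by omega⟩
    refine ⟨_, List.mem_map_of_mem (a := a) (by rw [List.mem_range]; omega), ?_⟩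
    rw [hw_map_range]
    refine ⟨b, by omega, ?_⟩
    rw [dsum_eq_sum6 t (a : Int) (b : Int) 0 1 (fun k => cellA t (a : Int) ((b + k : ℕ) : Int))
      (by intro k hk; congr 1 <;> push_cast <;> ring)]
    exact h9

theorem zipM_eq (t : List (List Int)) (m : ℕ) (hm : 0 < m) :
    pyZipStar ((List.range m).map (fun r : ℕ => (List.range m).map fun c : ℕ => cellA t (r : Int) (c : Int)))
      = (List.range m).map (fun c : ℕ => (List.range m).map fun r : ℕ => cellA t (r : Int) (c : Int)) := by
  unfold pyZipStar
  have hlenmap : (((List.range m).map (fun r : ℕ => (List.range m).map fun c : ℕ => cellA t (r : Int) (c : Int))).map List.length)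
      = List.replicate m m := by
    rw [List.map_map, List.eq_replicate_iff]
    refine ⟨by simp, ?_⟩
    intro b hb
    rw [List.mem_map] at hb
    obtain ⟨y, _, rfl⟩ := hb
    simp
  rw [hlenmap, min?_const _ m (by simp; omega) (fun x hx => (List.eq_of_mem_replicate hx))]
  simp only [Option.getD_some]
  apply List.map_congr_left
  intro c hc
  rw [List.mem_range] at hc
  rw [List.map_map]
  apply List.map_congr_left
  intro r _
  simp only [Function.comp]
  rw [List.getD_eq_getElem?_getD, List.getElem?_map, List.getElem?_range hc]
  simp

theorem colsM_any_iff (t : List (List Int)) (m : ℕ) (h6 : 6 ≤ m) :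
    ((List.range m).map (fun c : ℕ => (List.range m).map fun r : ℕ => cellA t (r : Int) (c : Int))).any has_window = true
      ↔ Win (m : Int) t 1 0 := by
  rw [List.any_eq_true]
  constructor
  · rintro ⟨line, hline, hw⟩
    rw [List.mem_map] at hline
    obtain ⟨c, hc, rfl⟩ := hline
    rw [List.mem_range] at hc
    rw [hw_map_range] at hw
    obtain ⟨s, hs, hsum⟩ := hw
    refine ⟨(s : Int), (c : Int), by omega, by omega, by omega, by omega, by omega, by omega, by omega, by omega, ?_⟩
    rw [← dsum_eq_sum6 t (s : Int) (c : Int) 1 0 (fun k => cellA t ((s + k : ℕ) : Int) (c : Int))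
      (by intro k hk; congr 1 <;> push_cast <;> ring)]
    exact hsum
  · rintro ⟨r, c, h1, h2, h3, h4, h5, h6', h7, h8, h9⟩
    obtain ⟨a, rfl⟩ : ∃ a : ℕ, r = (a : Int) := ⟨r.toNat, by omega⟩
    obtain ⟨b, rfl⟩ : ∃ b : ℕ, c = (b : Int) := ⟨c.toNat, by omega⟩
    refine ⟨_, List.mem_map_of_mem (a := b) (by rw [List.mem_range]; omega), ?_⟩
    rw [hw_map_range]
    refine ⟨a, by omega, ?_⟩
    rw [dsum_eq_sum6 t (a : Int) (b : Int) 1 0 (fun k => cellA t ((a + k : ℕ) : Int) (b : Int))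
      (by intro k hk; congr 1 <;> push_cast <;> ring)]
    exact h9

theorem diagsM_any_iff (t : List (List Int)) (m : ℕ) (h6 : 6 ≤ m) :
    ((PySem.List.pyRange (-((m : Int) - 6)) ((m : Int) - 5) 1).map fun d =>
        (PySem.List.pyRange (max 0 d) (min (m : Int) ((m : Int) + d)) 1).map fun r =>
          PySem.List.pyGetD (PySem.List.pyGetD ((List.range m).map (fun r : ℕ => (List.range m).map fun c : ℕ => cellA t (r : Int) (c : Int))) r [])
            (r - d) 0).any has_window = true
      ↔ Win (m : Int) t 1 1 := by
  rw [List.any_eq_true]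
  constructor
  · rintro ⟨line, hline, hw⟩
    rw [List.mem_map] at hline
    obtain ⟨d, hd, rfl⟩ := hline
    rw [PySem.List.mem_pyRange_one] at hd
    rw [pyRange_map, hw_map_range] at hw
    obtain ⟨s, hs, hsum⟩ := hw
    set a : Int := max 0 d with ha
    have hb : a + (s : Int) + 6 ≤ min (m : Int) ((m : Int) + d) := by omega
    refine ⟨a + (s : Int), a + (s : Int) - d, by omega, by omega, by omega, by omega, by omega, by omega, by omega, by omega, ?_⟩
    rw [← dsum_eq_sum6 t (a + (s : Int)) (a + (s : Int) - d) 1 1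
      (fun k => PySem.List.pyGetD (PySem.List.pyGetD ((List.range m).map (fun r : ℕ => (List.range m).map fun c : ℕ => cellA t (r : Int) (c : Int))) (a + ((s + k : ℕ) : Int)) []) ((a + ((s + k : ℕ) : Int)) - d) 0)
      ?_]
    · exact hsum
    · intro k hk
      beta_reduce
      rw [cell_of_M t m (a + ((s + k : ℕ) : Int)) ((a + ((s + k : ℕ) : Int)) - d) (by omega) (by push_cast; omega) (by push_cast; omega) (by push_cast; omega)]
      congr 1 <;> push_cast <;> ring
  · rintro ⟨r, c, h1, h2, h3, h4, h5, h6', h7, h8, h9⟩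
    refine ⟨_, List.mem_map_of_mem (a := r - c) (by rw [PySem.List.mem_pyRange_one]; omega), ?_⟩
    rw [pyRange_map, hw_map_range]
    set a : Int := max 0 (r - c) with ha
    refine ⟨(r - a).toNat, by omega, ?_⟩
    rw [dsum_eq_sum6 t r c 1 1
      (fun k => PySem.List.pyGetD (PySem.List.pyGetD ((List.range m).map (fun r : ℕ => (List.range m).map fun c : ℕ => cellA t (r : Int) (c : Int))) (a + (((r - a).toNat + k : ℕ) : Int)) []) ((a + (((r - a).toNat + k : ℕ) : Int)) - (r - c)) 0)
      ?_]
    · exact h9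
    · intro k hk
      beta_reduce
      rw [cell_of_M t m (a + (((r - a).toNat + k : ℕ) : Int)) ((a + (((r - a).toNat + k : ℕ) : Int)) - (r - c)) (by push_cast; omega) (by push_cast; omega) (by push_cast; omega) (by push_cast; omega)]
      congr 1 <;> push_cast <;> omega

theorem antisM_any_iff (t : List (List Int)) (m : ℕ) (h6 : 6 ≤ m) :
    ((PySem.List.pyRange 5 (2 * (m : Int) - 6) 1).map fun k =>
        (PySem.List.pyRange (max 0 (k - (m : Int) + 1)) (min (m : Int) (k + 1)) 1).map fun r =>
          PySem.List.pyGetD (PySem.List.pyGetD ((List.range m).map (fun r : ℕ => (List.range m).map fun c : ℕ => cellA t (r : Int) (c : Int))) r [])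
            (k - r) 0).any has_window = true
      ↔ Win (m : Int) t 1 (-1) := by
  rw [List.any_eq_true]
  constructor
  · rintro ⟨line, hline, hw⟩
    rw [List.mem_map] at hline
    obtain ⟨d, hd, rfl⟩ := hline
    rw [PySem.List.mem_pyRange_one] at hd
    rw [pyRange_map, hw_map_range] at hw
    obtain ⟨s, hs, hsum⟩ := hw
    set a : Int := max 0 (d - (m : Int) + 1) with ha
    have hb : a + (s : Int) + 6 ≤ min (m : Int) (d + 1) := by omega
    refine ⟨a + (s : Int), d - (a + (s : Int)), by omega, by omega, by omega, by omega, by omega, by omega, by omega, by omega, ?_⟩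
    rw [← dsum_eq_sum6 t (a + (s : Int)) (d - (a + (s : Int))) 1 (-1)
      (fun k => PySem.List.pyGetD (PySem.List.pyGetD ((List.range m).map (fun r : ℕ => (List.range m).map fun c : ℕ => cellA t (r : Int) (c : Int))) (a + ((s + k : ℕ) : Int)) []) (d - (a + ((s + k : ℕ) : Int))) 0)
      ?_]
    · exact hsum
    · intro k hk
      beta_reduce
      rw [cell_of_M t m (a + ((s + k : ℕ) : Int)) (d - (a + ((s + k : ℕ) : Int))) (by omega) (by push_cast; omega) (by push_cast; omega) (by push_cast; omega)]
      congr 1 <;> push_cast <;> ring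
  · rintro ⟨r, c, h1, h2, h3, h4, h5, h6', h7, h8, h9⟩
    refine ⟨_, List.mem_map_of_mem (a := r + c) (by rw [PySem.List.mem_pyRange_one]; omega), ?_⟩
    rw [pyRange_map, hw_map_range]
    set a : Int := max 0 (r + c - (m : Int) + 1) with ha
    refine ⟨(r - a).toNat, by omega, ?_⟩
    rw [dsum_eq_sum6 t r c 1 (-1)
      (fun k => PySem.List.pyGetD (PySem.List.pyGetD ((List.range m).map (fun r : ℕ => (List.range m).map fun c : ℕ => cellA t (r : Int) (c : Int))) (a + (((r - a).toNat + k : ℕ) : Int)) []) ((r + c) - (a + (((r - a).toNat + k : ℕ) : Int))) 0)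
      ?_]
    · exact h9
    · intro k hk
      beta_reduce
      rw [cell_of_M t m (a + (((r - a).toNat + k : ℕ) : Int)) ((r + c) - (a + (((r - a).toNat + k : ℕ) : Int))) (by push_cast; omega) (by push_cast; omega) (by push_cast; omega) (by push_cast; omega)]
      congr 1 <;> push_cast <;> omega

theorem B_iff (n : Int) (t : List (List Int)) (hpre : Pre_check n t) :
    check_alt n t = true ↔ (Win n t 0 1 ∨ Win n t 1 0 ∨ Win n t 1 1 ∨ Win n t 1 (-1)) := by
  by_cases hn : n < 6
  · unfold check_alt
    rw [if_pos hn]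
    simp only [Bool.false_eq_true, false_iff]
    push_neg
    exact ⟨Win_small n t 0 1 hn (by simp), Win_small n t 1 0 hn (by simp),
      Win_small n t 1 1 hn (by simp), Win_small n t 1 (-1) hn (by simp)⟩
  · have h6 : (6 : Int) ≤ n := by omega
    obtain ⟨hlen, hrows⟩ := hpre h6
    obtain ⟨m, rfl⟩ : ∃ m : ℕ, n = (m : Int) := ⟨n.toNat, by omega⟩
    have hm6 : 6 ≤ m := by exact_mod_cast h6
    have hlen' : m ≤ t.length := by exact_mod_cast hlen
    have hrow' : ∀ row ∈ t.take m, m ≤ row.length := by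
      intro row hr
      have := hrows row (by simpa using hr)
      exact_mod_cast this
    unfold check_alt
    rw [if_neg hn]
    simp only [rows_eq t m hlen' hrow']
    rw [zipM_eq t m (by omega)]
    simp only [List.any_append, Bool.or_eq_true]
    rw [rowsM_any_iff t m hm6, colsM_any_iff t m hm6, diagsM_any_iff t m hm6, antisM_any_iff t m hm6]
    tauto

-- ===== VERDICT (by name: the statement is the Claim_ definition above) =====
theorem check_spec : Claim_equal_check := by
  intro n t _ hpre
  unfold Spec_check
  have ha := A_iff n t hpre
  have hb := B_iff n t hpre
  cases hA : check n t <;> cases hB : check_alt n t <;> simp_all
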